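-- pv_equiv track=rewrite | github.com/cstuartroe/scale-theory | src/scales/cycle_stats.py | bool_scales
-- ===== SOURCE A (Python) =====
-- def bool_scales(length, trues):
--     if trues == 0:
--         yield [False] * length
--     elif trues == length:
--         yield [True] * length
--     else:
--         for s in bool_scales(length - 1, trues):
--             yield [False] + s
--         for s in bool_scales(length - 1, trues - 1):
--             yield [True] + s
-- ===== SOURCE B (Python) =====
-- def bool_scales(length, trues):
--     # Iterative depth-first walk with an explicit stack; each frame carries the
--     # prefix built so far, and leaves emit prefix + constant tail directly.
--     stack = [([], length, trues)]
--     while stack: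
--         prefix, cells, t = stack.pop()
--         if t == 0:
--             yield prefix + [False] * cells
--         elif t == cells:
--             yield prefix + [True] * cells
--         else:
--             stack.append((prefix + [True], cells - 1, t - 1))
--             stack.append((prefix + [False], cells - 1, t))
-- ===== Notes on version B (the rewrite author's own statement) =====
-- stated objective: alternative
-- what changed: A is a lazy two-branch recursion that prefixes a cell onto every list produced by its subcalls; B is an iterative depth-first walk with an explicit stack whose frames carry the prefix forward, emitting each row once at a leaf as prefix + constant tail.
import Mathlib
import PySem

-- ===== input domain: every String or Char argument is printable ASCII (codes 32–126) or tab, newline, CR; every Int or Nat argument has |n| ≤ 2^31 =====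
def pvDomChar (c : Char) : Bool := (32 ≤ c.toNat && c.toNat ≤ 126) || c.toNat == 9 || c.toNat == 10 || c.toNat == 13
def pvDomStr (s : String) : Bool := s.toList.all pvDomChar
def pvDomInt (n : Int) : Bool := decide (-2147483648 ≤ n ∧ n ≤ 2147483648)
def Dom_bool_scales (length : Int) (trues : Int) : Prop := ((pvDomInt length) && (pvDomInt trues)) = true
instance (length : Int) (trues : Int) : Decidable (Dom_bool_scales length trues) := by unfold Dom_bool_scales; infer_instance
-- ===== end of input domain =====

-- B replaces A's lazy two-branch recursion (which prefixes a cell onto every result of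
-- the subcalls) by an iterative explicit-stack depth-first walk whose frames carry the
-- prefix forward and emit each row once at a leaf (objective: alternative).

-- ===== PORT A =====
-- A's generator recursion, materialised as a list; the fuel argument only makes the
-- recursion structurally terminating (length.toNat + 1 steps always suffice on Pre_).
def boolScalesA : Nat → Int → Int → List (List Bool)
  | 0, _, _ => []
  | f+1, n, k =>
    if k = 0 then [List.replicate n.toNat false]
    else if k = n then [List.replicate n.toNat true]
    else (boolScalesA f (n-1) k).map (fun s => false :: s)
         ++ (boolScalesA f (n-1) (k-1)).map (fun s => true :: s)

def bool_scales (length : Int) (trues : Int) : List (List Bool) :=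
  boolScalesA (length.toNat + 1) length trues

-- ===== PORT B =====
-- Source B's while-loop over the explicit stack; the fuel argument only bounds the number
-- of loop iterations (2^(length.toNat+1) always suffices on Pre_, see run_eq below).
def runStackB : Nat → List (List Bool × Int × Int) → List (List Bool)
  | _, [] => []
  | 0, _ :: _ => []
  | f+1, (pre, cells, t) :: rest =>
    if t = 0 then (pre ++ List.replicate cells.toNat false) :: runStackB f rest
    else if t = cells then (pre ++ List.replicate cells.toNat true) :: runStackB f rest
    else runStackB f ((pre ++ [false], cells - 1, t)
                      :: (pre ++ [true], cells - 1, t - 1) :: rest)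

def bool_scales_alt (length : Int) (trues : Int) : List (List Bool) :=
  runStackB (2 ^ (length.toNat + 1)) [([], length, trues)]

-- ===== PRECONDITION & SPEC =====
-- Pre_ excludes exactly the inputs where the Python A does not return normally
-- (RecursionError: trues ∉ {0, length} with trues < 0 or trues > length);
-- B's loop does not terminate there either.
def Pre_bool_scales (length : Int) (trues : Int) : Prop :=
  trues = 0 ∨ trues = length ∨ (0 ≤ trues ∧ trues ≤ length)
instance (length : Int) (trues : Int) : Decidable (Pre_bool_scales length trues) := by
  unfold Pre_bool_scales; infer_instance

def pvWitness_bool_scales : Int × Int := (4, 2)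

def Spec_bool_scales (length : Int) (trues : Int) (out : List (List Bool)) : Prop :=
  out = bool_scales_alt length trues
instance (length : Int) (trues : Int) (out : List (List Bool)) : Decidable (Spec_bool_scales length trues out) := by
  unfold Spec_bool_scales; infer_instance

-- ===== CLAIM (what is proved, stated in full; the proofs are below) =====
def Claim_equal_bool_scales : Prop := ∀ (length : Int) (trues : Int), Dom_bool_scales length trues → Pre_bool_scales length trues → Spec_bool_scales length trues (bool_scales length trues)

-- ===== LEMMAS AND PROOFS =====

-- The mathematical enumeration both programs compute: E m j = all bool lists of
-- length m with j Trues, in lexicographic (False < True) order.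
def E : Nat → Nat → List (List Bool)
  | 0, j => if j = 0 then [[]] else []
  | m+1, j => (E m j).map (fun s => false :: s)
              ++ (if j = 0 then [] else (E m (j-1)).map (fun s => true :: s))

theorem E_zero : ∀ m, E m 0 = [List.replicate m false] := by
  intro m
  induction m with
  | zero => simp [E]
  | succ m ih => simp [E, ih, List.replicate_succ]

theorem E_gt : ∀ m j, m < j → E m j = [] := by
  intro m
  induction m with
  | zero => intro j hj; simp [E]; omega
  | succ m ih =>
    intro j hj
    have h0 : j ≠ 0 := by omega
    simp [E, h0, ih j (by omega), ih (j-1) (by omega)]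

theorem E_diag : ∀ m, E m m = [List.replicate m true] := by
  intro m
  induction m with
  | zero => simp [E]
  | succ m ih =>
    simp [E, ih, E_gt m (m+1) (by omega), List.replicate_succ]

-- A stack frame whose processing terminates: A's three-way case analysis applies.
def ValidFrame : List Bool × Int × Int → Prop
  | (_, c, t) => t = 0 ∨ t = c ∨ (0 ≤ t ∧ t ≤ c)

-- Worst-case number of loop iterations to drain a frame with `cells` slots.
def frameSteps : List Bool × Int × Int → Nat
  | (_, c, _) => 2 ^ (c.toNat + 1) - 1

-- A computes E.
theorem A_eq_E : ∀ (f : Nat) (n k : Int), (k = 0 ∨ k = n ∨ (0 ≤ k ∧ k ≤ n)) →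
    n.toNat < f → boolScalesA f n k = E n.toNat k.toNat := by
  intro f
  induction f with
  | zero => intro n k _ hf; omega
  | succ f ih =>
    intro n k hpre hf
    by_cases hk0 : k = 0
    · subst hk0; simp [boolScalesA, E_zero]
    · by_cases hkn : k = n
      · subst hkn
        simp [boolScalesA, hk0, E_diag]
      · have hk : 0 ≤ k ∧ k ≤ n := by tauto
        have h1 : 1 ≤ k := by omega
        have hn : 1 ≤ n := by omega
        simp only [boolScalesA, if_neg hk0, if_neg hkn]
        rw [ih (n-1) k (Or.inr (Or.inr ⟨by omega, by omega⟩)) (by omega),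
            ih (n-1) (k-1) (Or.inr (Or.inr ⟨by omega, by omega⟩)) (by omega)]
        have hnt : n.toNat = (n-1).toNat + 1 := by omega
        have hkt : (k-1).toNat = k.toNat - 1 := by omega
        have hkt0 : k.toNat ≠ 0 := by omega
        rw [hnt, hkt]
        simp [E, hkt0]

-- B's loop drains the stack to the concatenation of the per-frame enumerations,
-- as soon as the fuel covers the summed per-frame worst cases.
theorem run_eq : ∀ (f : Nat) (s : List (List Bool × Int × Int)),
    (∀ e ∈ s, ValidFrame e) → (s.map frameSteps).sum ≤ f →
    runStackB f s = s.flatMap (fun e => (E e.2.1.toNat e.2.2.toNat).map (fun r => e.1 ++ r)) := by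
  intro f
  induction f using Nat.strong_induction_on with
  | _ f ih =>
    intro s hval hfuel
    cases s with
    | nil => cases f <;> simp [runStackB]
    | cons e rest =>
      obtain ⟨p, c, t⟩ := e
      have hsteps : frameSteps (p, c, t) = 2 ^ (c.toNat + 1) - 1 := rfl
      have hone : 1 ≤ 2 ^ (c.toNat + 1) := Nat.one_le_two_pow
      cases f with
      | zero =>
        exfalso
        simp only [List.map_cons, List.sum_cons, hsteps] at hfuel
        omega
      | succ f =>
        have hvrest : ∀ e ∈ rest, ValidFrame e := fun e he => hval e (List.mem_cons_of_mem _ he)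
        have hfuel' : (rest.map frameSteps).sum ≤ f := by
          simp only [List.map_cons, List.sum_cons, hsteps] at hfuel
          omega
        by_cases ht0 : t = 0
        · subst ht0
          simp only [runStackB]
          rw [ih f (by omega) rest hvrest hfuel']
          simp [E_zero]
        · by_cases htc : t = c
          · subst htc
            simp only [runStackB, if_neg ht0]
            rw [ih f (by omega) rest hvrest hfuel']
            have hd : E t.toNat t.toNat = [List.replicate t.toNat true] := E_diag t.toNat
            simp [hd]
          · have hvt : 0 ≤ t ∧ t ≤ c := by
              rcases hval (p, c, t) List.mem_cons_self with h | h | h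
              · exact absurd h ht0
              · exact absurd h htc
              · exact h
            have hc1 : 1 ≤ c := by omega
            have hct : c.toNat = (c-1).toNat + 1 := by omega
            have hchild : frameSteps (p ++ [false], c - 1, t) = 2 ^ ((c-1).toNat + 1) - 1 := rfl
            have hchild' : frameSteps (p ++ [true], c - 1, t - 1) = 2 ^ ((c-1).toNat + 1) - 1 := rfl
            have honec : 1 ≤ 2 ^ ((c-1).toNat + 1) := Nat.one_le_two_pow
            simp only [runStackB, if_neg ht0, if_neg htc]
            rw [ih f (by omega)
                ((p ++ [false], c - 1, t) :: (p ++ [true], c - 1, t - 1) :: rest)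
                (by
                  intro e he
                  rcases he with _ | ⟨_, he⟩
                  · exact Or.inr (Or.inr ⟨by omega, by omega⟩)
                  · rcases he with _ | ⟨_, he⟩
                    · exact Or.inr (Or.inr ⟨by omega, by omega⟩)
                    · exact hvrest _ he)
                (by
                  simp only [List.map_cons, List.sum_cons, hsteps, hchild, hchild'] at hfuel ⊢
                  have hpow : 2 ^ (c.toNat + 1) = 2 ^ ((c-1).toNat + 1) + 2 ^ ((c-1).toNat + 1) := by
                    rw [hct]; ring
                  omega)]
            simp only [List.flatMap_cons]
            have hE : E c.toNat t.toNat
                = (E (c-1).toNat t.toNat).map (fun s => false :: s)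
                  ++ (E (c-1).toNat (t-1).toNat).map (fun s => true :: s) := by
              rw [hct]
              have ht0n : t.toNat ≠ 0 := by omega
              have htm : (t-1).toNat = t.toNat - 1 := by omega
              rw [htm]
              simp [E, ht0n]
            rw [hE]
            simp [List.map_map, Function.comp_def, List.append_assoc]

-- ===== VERDICT (by name: the statement is the Claim_ definition above) =====
theorem bool_scales_spec : Claim_equal_bool_scales := by
  intro length trues _ hpre
  unfold Spec_bool_scales bool_scales bool_scales_alt
  rw [run_eq (2 ^ (length.toNat + 1)) [([], length, trues)]
      (by intro e he; simp at he; subst he; exact hpre)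
      (by
        have hs : frameSteps ([], length, trues) = 2 ^ (length.toNat + 1) - 1 := rfl
        have hone : 1 ≤ 2 ^ (length.toNat + 1) := Nat.one_le_two_pow
        simp only [List.map_cons, List.map_nil, List.sum_cons, List.sum_nil, hs]
        omega)]
  simp only [List.flatMap_cons, List.flatMap_nil, List.append_nil, List.nil_append]
  rw [A_eq_E (length.toNat + 1) length trues hpre (by omega)]
  simp
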